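-- pv_equiv track=rewrite | github.com/CaptainCthulhu/Advent_Of_Code | Advent of Code/2018/10-1.py | Search
-- ===== SOURCE A (Python) =====
-- threshhold = 10
--
-- indicator = "X"
--
-- def Search(organized):
--     yCount, xCount, sideWaysPlus, sideWaysNeg  = 0,0,0,0
--
--     for y in range(len(organized)):
--         for x in  range(len(organized)):
--             if organized[y][x] == indicator:
--                 #y
--                 yCount = sum([1 for i in range(y, min(y+threshhold, len(organized)))
--                     if organized[i][x] == indicator])
--
--                 #x
--                 xCount = sum([1 for i in range(x, min(x+threshhold, len(organized[y])))
--                     if organized[y][i] == indicator])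
--                 #sideways+
--                 #sidways-
--                 if yCount >= threshhold or xCount >= threshhold:
--                     return True
--     return False
-- ===== SOURCE B (Python) =====
-- threshhold = 10
--
-- indicator = "X"
--
-- def Search(organized):
--     n = len(organized)
--
--     def has_run(cells):
--         run = 0
--         for c in cells:
--             run = run + 1 if c == indicator else 0
--             if run >= threshhold:
--                 return True
--         return False
--
--     # horizontal: a qualifying run starts in the first n columns, so the first
--     # n + threshhold - 1 cells of each row are enough to decide
--     if any(has_run(row[:n + threshhold - 1]) for row in organized):
--         return True
--     # vertical: build the n columns of the n x n square and scan each
--     columns = [[organized[y][x] for y in range(n)] for x in range(n)]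
--     return any(has_run(col) for col in columns)
-- ===== Notes on version B (the rewrite author's own statement) =====
-- stated objective: alternative
-- what changed: A checks, at every indicator cell, a 10-cell windowed count downwards and rightwards (re-scanning up to 20 cells per cell); B instead makes one run-counter scan per line: each row truncated to the first n+9 cells (a qualifying run must start in the first n columns) and each of the n columns of the square, returning True as soon as a counter reaches 10.
import Mathlib
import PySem

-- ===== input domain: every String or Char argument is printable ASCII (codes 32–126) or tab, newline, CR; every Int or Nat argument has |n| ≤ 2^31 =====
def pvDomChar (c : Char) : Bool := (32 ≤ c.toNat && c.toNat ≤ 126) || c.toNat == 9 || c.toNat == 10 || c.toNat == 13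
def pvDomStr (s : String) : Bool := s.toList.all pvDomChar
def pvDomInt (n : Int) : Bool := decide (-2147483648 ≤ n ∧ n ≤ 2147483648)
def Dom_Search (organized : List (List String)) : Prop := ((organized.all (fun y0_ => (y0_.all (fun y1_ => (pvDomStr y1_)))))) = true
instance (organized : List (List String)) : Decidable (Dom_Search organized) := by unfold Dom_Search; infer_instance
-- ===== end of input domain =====

-- B replaces A's per-cell 10-wide windowed counts by one run-counter scan per row/column (alternative decomposition, similar cost).
-- Pre_Search excludes grids with a row shorter than len(organized): on those A raises IndexError except when a run is found first
-- (excluded example: 10 rows ['X'] — A returns True, B raises IndexError).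


def threshhold : Int := 10

def indicator : String := "X"

-- ===== PORT A =====
-- early 'return True' from the two stateless nested for-loops is the double 'any';
-- organized[y][x] is pyGet? + getD (Pre_Search keeps every access in range, where getD equals Python's result);
-- sum([1 for i in range(..) if cond]) is countP over the same pyRange.
def Search (organized : List (List String)) : Bool :=
  (PySem.List.pyRange 0 (PySem.List.len organized) 1).any fun y =>
    (PySem.List.pyRange 0 (PySem.List.len organized) 1).any fun x =>
      let row := (PySem.List.pyGet? organized y).getD []
      if (PySem.List.pyGet? row x).getD "" == indicator then
        let yCount : Int :=
          ((PySem.List.pyRange y (min (y + threshhold) (PySem.List.len organized)) 1).countP fun i =>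
            (PySem.List.pyGet? ((PySem.List.pyGet? organized i).getD []) x).getD "" == indicator : Nat)
        let xCount : Int :=
          ((PySem.List.pyRange x (min (x + threshhold) (PySem.List.len row)) 1).countP fun i =>
            (PySem.List.pyGet? row i).getD "" == indicator : Nat)
        decide (threshhold ≤ yCount) || decide (threshhold ≤ xCount)
      else false

-- ===== PORT B =====
-- has_run's counter is a nonnegative int; early 'return True' makes it the if/recursion below.
def hasRun : Int → List String → Bool
  | _run, [] => false
  | run, c :: rest =>
    let run' := if c == indicator then run + 1 else 0
    if threshhold ≤ run' then true else hasRun run' rest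

-- row[:n + threshhold - 1] is PySem.List.slice; organized[y][x] for y,x in range(n) is getD
-- (in range under Pre_Search, where getD equals Python's result).
def Search_alt (organized : List (List String)) : Bool :=
  let n := organized.length
  if organized.any (fun row => hasRun 0 (PySem.List.slice row none (some ((n : Int) + threshhold - 1)))) then
    true
  else
    let columns := (List.range n).map fun x => (List.range n).map fun y => (organized.getD y []).getD x ""
    columns.any fun col => hasRun 0 col

-- ===== PRECONDITION & SPEC =====
-- Pre_Search excludes grids with a row shorter than len(organized): there A raises IndexError
-- unless a run is found first (it indexes every row at columns 0..len(organized)-1).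
def Pre_Search (organized : List (List String)) : Prop :=
  ∀ row ∈ organized, organized.length ≤ row.length
instance (organized : List (List String)) : Decidable (Pre_Search organized) := by
  unfold Pre_Search; infer_instance

def pvWitness_Search : List (List String) := [["X"]]

def Spec_Search (organized : List (List String)) (out : Bool) : Prop := out = Search_alt organized
instance (organized : List (List String)) (out : Bool) : Decidable (Spec_Search organized out) := by unfold Spec_Search; infer_instance

-- ===== CLAIM (what is proved, stated in full; the proofs are below) =====
def Claim_equal_Search : Prop := ∀ (organized : List (List String)), Dom_Search organized → Pre_Search organized → Spec_Search organized (Search organized)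

-- ===== LEMMAS AND PROOFS =====

def cellOf (g : List (List String)) (y x : Nat) : String := (g.getD y []).getD x ""

def colOf (g : List (List String)) (x : Nat) : List String :=
  (List.range g.length).map fun y => cellOf g y x

def RunAt (w : List String) (i : Nat) : Prop := ∀ j : Nat, j < 10 → w[i + j]? = some "X"

theorem runAt_lt_length {w : List String} {i : Nat} (h : RunAt w i) : i + 9 < w.length :=
  (List.getElem?_eq_some_iff.mp (h 9 (by omega))).1

theorem getElem?_colOf (g : List (List String)) (x k : Nat) :
    (colOf g x)[k]? = if k < g.length then some (cellOf g k x) else none := by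
  by_cases hk : k < g.length
  · simp [colOf, hk]
  · simp [colOf, hk]

theorem getD_eq_X_iff (w : List String) (k : Nat) : w.getD k "" = "X" ↔ w[k]? = some "X" := by
  rw [List.getD_eq_getElem?_getD]
  cases hk : w[k]? <;> simp

theorem runAt_take (w : List String) (m i : Nat) :
    RunAt (w.take m) i ↔ i + 9 < m ∧ RunAt w i := by
  constructor
  · intro h
    have hlen : i + 9 < (w.take m).length := runAt_lt_length h
    simp [List.length_take] at hlen
    refine ⟨hlen.1, fun j hj => ?_⟩
    have := h j hj
    rwa [List.getElem?_take_of_lt (by omega)] at this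
  · rintro ⟨hm, h⟩
    intro j hj
    rw [List.getElem?_take_of_lt (by omega)]
    exact h j hj

theorem length_colOf (g : List (List String)) (x : Nat) : (colOf g x).length = g.length := by
  simp [colOf]

theorem runAt_iff_getD (w : List String) (k : Nat) :
    RunAt w k ↔ k + 10 ≤ w.length ∧ ∀ j < 10, w.getD (k + j) "" = "X" := by
  constructor
  · intro h
    have := runAt_lt_length h
    exact ⟨by omega, fun j hj => (getD_eq_X_iff w (k + j)).mpr (h j hj)⟩
  · rintro ⟨hl, h⟩ j hj
    exact (getD_eq_X_iff w (k + j)).mp (h j hj)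

theorem row_eq (g : List (List String)) (y : Int) (hy : 0 ≤ y) :
    (PySem.List.pyGet? g y).getD [] = g.getD y.toNat [] := by
  rw [PySem.List.pyGet?_of_nonneg g hy, List.getD_eq_getElem?_getD]

theorem cell_colOf (g : List (List String)) (i x : Int) (hi : 0 ≤ i) (hx : 0 ≤ x) :
    (PySem.List.pyGet? ((PySem.List.pyGet? g i).getD []) x).getD ""
      = (PySem.List.pyGet? (colOf g x.toNat) i).getD "" := by
  rw [row_eq g i hi, PySem.List.pyGet?_of_nonneg _ hx, PySem.List.pyGet?_of_nonneg _ hi,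
    getElem?_colOf]
  by_cases h : i.toNat < g.length
  · rw [if_pos h]
    simp [cellOf, List.getD_eq_getElem?_getD]
  · rw [if_neg h, List.getD_eq_getElem?_getD,
      List.getElem?_eq_none (show g.length ≤ i.toNat by omega)]
    simp

theorem hasRun_iff (l : List String) (r : Int) (h0 : 0 ≤ r) (h9 : r ≤ 9) :
    hasRun r l = true ↔ ∃ i, RunAt (List.replicate r.toNat "X" ++ l) i := by
  induction l generalizing r with
  | nil =>
    simp only [hasRun, List.append_nil]
    constructor
    · intro h; exact absurd h (by simp)
    · rintro ⟨i, hi⟩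
      have := runAt_lt_length hi
      simp [List.length_replicate] at this
      omega
  | cons c rest ih =>
    by_cases hc : c = "X"
    · subst hc
      have hrep : List.replicate r.toNat "X" ++ "X" :: rest
          = List.replicate (r + 1).toNat "X" ++ rest := by
        have : (r + 1).toNat = r.toNat + 1 := by omega
        rw [this, List.replicate_succ', List.append_assoc]
        simp
      by_cases hr : r = 9
      · subst hr
        constructor
        · intro _
          rw [hrep]
          refine ⟨0, fun j hj => ?_⟩
          rw [List.getElem?_append_left (by simp; omega)]
          rw [List.getElem?_replicate]
          rw [if_pos (by omega)]
        · intro _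
          norm_num [hasRun, indicator, threshhold]
      · have hstep : hasRun r ("X" :: rest) = hasRun (r + 1) rest := by
          simp only [hasRun, indicator, threshhold]
          norm_num
          intro h; omega
        rw [hstep, hrep]
        exact ih (r + 1) (by omega) (by omega)
    · have hstep : hasRun r (c :: rest) = hasRun 0 rest := by
        have hb : (c == indicator) = false := by simp [indicator, hc]
        simp only [hasRun, hb, Bool.false_eq_true, if_false]
        norm_num [threshhold]
      rw [hstep, ih 0 le_rfl (by norm_num)]
      simp only [Int.toNat_zero, List.replicate_zero, List.nil_append]
      constructor
      · rintro ⟨i, hi⟩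
        refine ⟨r.toNat + 1 + i, fun j hj => ?_⟩
        rw [List.getElem?_append_right (by simp; omega)]
        simp only [List.length_replicate]
        have : r.toNat + 1 + i + j - r.toNat = i + j + 1 := by omega
        rw [this]
        simpa using hi j hj
      · rintro ⟨i, hi⟩
        have hik : r.toNat + 1 ≤ i := by
          by_contra hle
          have hj : r.toNat - i < 10 := by omega
          have := hi (r.toNat - i) hj
          rw [List.getElem?_append_right (by simp; omega)] at this
          simp only [List.length_replicate] at this
          have : (c :: rest)[i + (r.toNat - i) - r.toNat]? = some "X" := this
          rw [show i + (r.toNat - i) - r.toNat = 0 by omega] at this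
          simp at this
          exact hc this
        refine ⟨i - (r.toNat + 1), fun j hj => ?_⟩
        have := hi j hj
        rw [List.getElem?_append_right (by simp; omega)] at this
        simp only [List.length_replicate] at this
        rw [show i + j - r.toNat = (i - (r.toNat + 1) + j) + 1 by omega] at this
        simpa using this

theorem hasRun_zero_iff (l : List String) : hasRun 0 l = true ↔ ∃ i, RunAt l i := by
  simpa using hasRun_iff l 0 le_rfl (by norm_num)

theorem count_window_iff (w : List String) (a : Int) (ha : 0 ≤ a) :
    (threshhold ≤ ((((PySem.List.pyRange a (min (a + threshhold) (w.length : Int)) 1).countP fun i =>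
        (PySem.List.pyGet? w i).getD "" == indicator) : Nat) : Int)) ↔ RunAt w a.toNat := by
  have hlen : (PySem.List.pyRange a (min (a + threshhold) (w.length : Int)) 1).length
      = ((min (a + threshhold) (w.length : Int)) - a).toNat := PySem.List.length_pyRange_one _ _
  have hle := List.countP_le_length
    (p := fun i => (PySem.List.pyGet? w i).getD "" == indicator)
    (l := PySem.List.pyRange a (min (a + threshhold) (w.length : Int)) 1)
  rw [runAt_iff_getD]
  simp only [threshhold] at *
  constructor
  · intro h
    have hcnt : ((PySem.List.pyRange a (min (a + 10) (w.length : Int)) 1).countP fun i =>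
        (PySem.List.pyGet? w i).getD "" == indicator) = (PySem.List.pyRange a (min (a + 10) (w.length : Int)) 1).length := by
      omega
    have hall := List.countP_eq_length.mp hcnt
    have hsz : a + 10 ≤ (w.length : Int) := by omega
    refine ⟨by omega, fun j hj => ?_⟩
    have hmem : (a + (j : Int)) ∈ PySem.List.pyRange a (min (a + 10) (w.length : Int)) 1 := by
      rw [PySem.List.mem_pyRange_one]
      omega
    have := hall _ hmem
    rw [beq_iff_eq, PySem.List.pyGet?_of_nonneg _ (by omega), indicator] at this
    rw [show (a + (j : Int)).toNat = a.toNat + j by omega] at this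
    rw [List.getD_eq_getElem?_getD]
    exact this
  · rintro ⟨hl, h⟩
    have hall : ∀ i ∈ PySem.List.pyRange a (min (a + 10) (w.length : Int)) 1,
        ((PySem.List.pyGet? w i).getD "" == indicator) = true := by
      intro i hi
      rw [PySem.List.mem_pyRange_one] at hi
      have h0i : 0 ≤ i := by omega
      have hj : (i - a).toNat < 10 := by omega
      have := h (i - a).toNat hj
      rw [beq_iff_eq, PySem.List.pyGet?_of_nonneg _ h0i, indicator]
      rw [show i.toNat = a.toNat + (i - a).toNat by omega]
      rw [List.getD_eq_getElem?_getD] at this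
      exact this
    have := List.countP_eq_length.mpr hall
    omega

def SpecProp (g : List (List String)) : Prop :=
  (∃ y < g.length, ∃ i, RunAt ((g.getD y []).take (g.length + 9)) i) ∨
  (∃ x < g.length, ∃ i, RunAt (colOf g x) i)

theorem searchB_iff (g : List (List String)) : Search_alt g = true ↔ SpecProp g := by
  have hslice : ∀ row : List String,
      PySem.List.slice row none (some ((g.length : Int) + threshhold - 1)) = row.take (g.length + 9) := by
    intro row
    rw [show ((g.length : Int) + threshhold - 1) = ((g.length + 9 : Nat) : Int) by
      simp [threshhold]; ring]
    exact PySem.List.slice_to_natCast row (g.length + 9)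
  have hrows : (g.any fun row => hasRun 0 (PySem.List.slice row none (some ((g.length : Int) + threshhold - 1)))) = true
      ↔ ∃ y < g.length, ∃ i, RunAt ((g.getD y []).take (g.length + 9)) i := by
    rw [List.any_eq_true]
    constructor
    · rintro ⟨row, hmem, hrun⟩
      obtain ⟨y, hy, rfl⟩ := List.mem_iff_getElem.mp hmem
      rw [hslice, hasRun_zero_iff] at hrun
      obtain ⟨i, hi⟩ := hrun
      exact ⟨y, hy, i, by rwa [List.getD_eq_getElem?_getD, List.getElem?_eq_getElem hy]⟩
    · rintro ⟨y, hy, i, hi⟩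
      refine ⟨g[y], List.getElem_mem hy, ?_⟩
      rw [hslice, hasRun_zero_iff]
      exact ⟨i, by rwa [List.getD_eq_getElem?_getD, List.getElem?_eq_getElem hy] at hi⟩
  have hcols : (((List.range g.length).map fun x => (List.range g.length).map fun y =>
        (g.getD y []).getD x "").any fun col => hasRun 0 col) = true
      ↔ ∃ x < g.length, ∃ i, RunAt (colOf g x) i := by
    have hceq : ∀ x, ((List.range g.length).map fun y => (g.getD y []).getD x "") = colOf g x := by
      intro x; simp [colOf, cellOf]
    rw [List.any_eq_true]
    constructor
    · rintro ⟨col, hmem, hrun⟩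
      obtain ⟨x, hxr, rfl⟩ := List.mem_map.mp hmem
      have hx : x < g.length := List.mem_range.mp hxr
      rw [hceq, hasRun_zero_iff] at hrun
      exact ⟨x, hx, hrun⟩
    · rintro ⟨x, hx, i, hi⟩
      refine ⟨colOf g x, ?_, ?_⟩
      · rw [← hceq]; exact List.mem_map.mpr ⟨x, List.mem_range.mpr hx, rfl⟩
      · rw [hasRun_zero_iff]; exact ⟨i, hi⟩
  show (if _ then _ else _) = true ↔ _
  unfold SpecProp
  split_ifs with h
  · simp only [true_iff]
    exact Or.inl (hrows.mp h)
  · rw [hcols]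
    constructor
    · exact Or.inr
    · rintro (hl | hr)
      · exact absurd (hrows.mpr hl) h
      · exact hr

theorem searchA_iff (g : List (List String)) : Search g = true ↔ SpecProp g := by
  unfold Search
  simp only [List.any_eq_true, PySem.List.mem_pyRange_one, PySem.List.len_eq]
  constructor
  · rintro ⟨y, ⟨⟨hy0, hyn⟩, x, ⟨hx0, hxn⟩, hbody⟩⟩
    rw [Bool.ite_eq_true_distrib] at hbody
    split_ifs at hbody with hcell
    · simp only [Bool.or_eq_true, decide_eq_true_eq] at hbody
      rcases hbody with hyc | hxc
      · right
        refine ⟨x.toNat, by omega, y.toNat, ?_⟩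
        rw [← count_window_iff _ y hy0, length_colOf]
        have hcg : ∀ i ∈ PySem.List.pyRange y (min (y + threshhold) ((g.length : Nat) : Int)) 1,
            (((PySem.List.pyGet? ((PySem.List.pyGet? g i).getD []) x).getD "" == indicator) = true
              ↔ ((PySem.List.pyGet? (colOf g x.toNat) i).getD "" == indicator) = true) := by
          intro i hi
          rw [PySem.List.mem_pyRange_one] at hi
          rw [cell_colOf g i x (by omega) hx0]
        rw [← List.countP_congr hcg]
        exact_mod_cast hyc
      · left
        refine ⟨y.toNat, by omega, x.toNat, ?_⟩
        rw [runAt_take]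
        refine ⟨by omega, ?_⟩
        rw [← count_window_iff _ x hx0]
        rwa [row_eq g y hy0] at hxc
  · rintro (⟨y, hy, i, hi⟩ | ⟨x, hx, i, hi⟩)
    · rw [runAt_take] at hi
      obtain ⟨hin, hrun⟩ := hi
      refine ⟨(y : Int), ⟨by omega, by omega⟩, (i : Int), ⟨by omega, by omega⟩, ?_⟩
      have hcell : (g[y]?.getD [])[i]?.getD "" = "X" := by
        have h0 := hrun 0 (by omega)
        simp only [Nat.add_zero] at h0
        rw [show g[y]?.getD [] = g.getD y [] from List.getD_eq_getElem?_getD.symm, h0]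
        rfl
      rw [Bool.ite_eq_true_distrib, if_pos (by simp [hcell, indicator])]
      simp only [Bool.or_eq_true, decide_eq_true_eq]
      right
      rw [row_eq g _ (by omega)]
      have := (count_window_iff (g.getD y []) (i : Int) (by omega)).mpr (by simpa using hrun)
      exact_mod_cast this
    · have hin : i + 9 < g.length := by
        have := runAt_lt_length hi
        rwa [length_colOf] at this
      refine ⟨(i : Int), ⟨by omega, by omega⟩, (x : Int), ⟨by omega, by omega⟩, ?_⟩
      have hcell0 : cellOf g i x = "X" := by
        have := hi 0 (by omega)
        rw [getElem?_colOf, if_pos (by omega)] at this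
        simpa using this
      have hcell : (g[i]?.getD [])[x]?.getD "" = "X" := by
        rw [show g[i]?.getD [] = g.getD i [] from List.getD_eq_getElem?_getD.symm,
          ← List.getD_eq_getElem?_getD]
        exact hcell0
      rw [Bool.ite_eq_true_distrib, if_pos (by simp [hcell, indicator])]
      simp only [Bool.or_eq_true, decide_eq_true_eq]
      left
      have hcg : ∀ j ∈ PySem.List.pyRange (i : Int) (min ((i : Int) + threshhold) ((g.length : Nat) : Int)) 1,
          ((((PySem.List.pyGet? ((PySem.List.pyGet? g j).getD []) (x : Int)).getD "" == indicator) = true)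
            ↔ (((PySem.List.pyGet? (colOf g x) j).getD "" == indicator) = true)) := by
        intro j hj
        rw [PySem.List.mem_pyRange_one] at hj
        have := cell_colOf g j (x : Int) (by omega) (by omega)
        simp only [Int.toNat_natCast] at this
        rw [this]
      rw [List.countP_congr hcg]
      have := (count_window_iff (colOf g x) (i : Int) (by omega)).mpr (by simpa using hi)
      rw [length_colOf] at this
      exact_mod_cast this

-- ===== VERDICT (by name: the statement is the Claim_ definition above) =====
theorem Search_spec : Claim_equal_Search := by
  intro g _ _
  unfold Spec_Search
  have h := (searchA_iff g).trans (searchB_iff g).symm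
  cases hA : Search g <;> cases hB : Search_alt g <;> simp_all
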